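-- pv_equiv track=rewrite | github.com/josyao1/BallKnowledge | scripts/generate_nba_starters.py | canonical_slot
-- ===== SOURCE A (Python) =====
-- POS_ORDER = {'G': 0, 'G-F': 1, 'F-G': 1, 'F': 2, 'F-C': 3, 'C-F': 3, 'C': 4}
--
-- SLOT_LABELS = ['PG', 'SG', 'SF', 'PF', 'C']
--
-- def canonical_slot(players: list[dict]) -> list[dict]:
--     """
--     Sort 5 players into canonical PG→SG→SF→PF→C slots based on their
--     raw NBA position string. Returns list in slot order with pos_abb set.
--     """
--     def pos_key(p: dict) -> int:
--         return POS_ORDER.get(p.get('_raw_pos', 'G'), 0)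
--
--     sorted_p = sorted(players, key=pos_key)
--     for i, p in enumerate(sorted_p[:5]):
--         p['pos_abb'] = SLOT_LABELS[i]
--         del p['_raw_pos']
--     return sorted_p[:5]
-- ===== SOURCE B (Python) =====
-- POS_ORDER = {'G': 0, 'G-F': 1, 'F-G': 1, 'F': 2, 'F-C': 3, 'C-F': 3, 'C': 4}
--
-- SLOT_LABELS = ['PG', 'SG', 'SF', 'PF', 'C']
--
--
-- def canonical_slot(players: list) -> list:
--     """Stable bucket sort over the 5 position keys instead of a comparison sort.
--
--     Like A, mutates the selected player dicts in place (sets pos_abb,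
--     deletes _raw_pos).
--     """
--     buckets = [[], [], [], [], []]
--     for p in players:
--         buckets[POS_ORDER.get(p.get('_raw_pos', 'G'), 0)].append(p)
--     result = [p for b in buckets for p in b][:5]
--     for i, p in enumerate(result):
--         p['pos_abb'] = SLOT_LABELS[i]
--         del p['_raw_pos']
--     return result
-- ===== Notes on version B (the rewrite author's own statement) =====
-- stated objective: alternative
-- what changed: Replaces the comparison sort (sorted with a key) by a one-pass stable bucket sort: each player is appended to one of five buckets indexed by its position key, and the buckets are concatenated in key order; the slot-labelling pass is unchanged.
import Mathlib
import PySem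

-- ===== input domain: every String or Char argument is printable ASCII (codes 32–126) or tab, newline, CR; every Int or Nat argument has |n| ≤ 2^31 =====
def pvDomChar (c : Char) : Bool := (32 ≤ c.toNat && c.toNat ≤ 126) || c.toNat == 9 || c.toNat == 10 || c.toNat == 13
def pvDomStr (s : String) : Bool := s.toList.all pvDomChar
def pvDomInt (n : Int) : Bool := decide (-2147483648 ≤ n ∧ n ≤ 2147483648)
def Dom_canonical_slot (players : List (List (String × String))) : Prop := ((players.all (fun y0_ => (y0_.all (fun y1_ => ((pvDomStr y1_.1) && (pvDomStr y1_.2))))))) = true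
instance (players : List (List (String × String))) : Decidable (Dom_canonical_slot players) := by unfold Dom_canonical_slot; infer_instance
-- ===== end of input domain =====

-- B replaces A's comparison sort by a one-pass stable 5-bucket sort; like A it rewrites
-- the selected player dicts (sets 'pos_abb', drops '_raw_pos') — the theorems are about
-- the RETURN value (the Lean ports are pure).

-- ===== PORT A =====
def POS_ORDER : PySem.Dict String Int :=
  PySem.Dict.ofList [("G", 0), ("G-F", 1), ("F-G", 1), ("F", 2), ("F-C", 3), ("C-F", 3), ("C", 4)]

def SLOT_LABELS : List String := ["PG", "SG", "SF", "PF", "C"]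

def pos_key (p : PySem.Dict String String) : Int :=
  POS_ORDER.getD (p.getD "_raw_pos" "G") 0

-- A: sorted(players, key=pos_key), then label the first five slots.
-- sorted_p[:5] is List.take 5 (exact: nonnegative literal bound).  'del p["_raw_pos"]'
-- raises KeyError when the key is absent — exactly the inputs Pre_ excludes — so it is
-- ported as the (there identical) Dict.erase.
def canonical_slot (players : List (List (String × String))) : List (List (String × String)) :=
  let sorted_p := PySem.List.sorted (players.map PySem.Dict.ofList) pos_key
  ((sorted_p.take 5).zipIdx.map (fun pi =>
    (((pi.1.insert "pos_abb" (SLOT_LABELS.getD pi.2 "")).erase "_raw_pos").items)))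

-- ===== PORT B =====
-- buckets[k].append(p): the five buckets are a 5-tuple of lists; Python's buckets[k]
-- for k = POS_ORDER.get(…) ∈ {0,…,4} is the if-chain below.
def bucketPut (acc : List (PySem.Dict String String) × List (PySem.Dict String String) ×
    List (PySem.Dict String String) × List (PySem.Dict String String) × List (PySem.Dict String String))
    (p : PySem.Dict String String) :
    List (PySem.Dict String String) × List (PySem.Dict String String) ×
    List (PySem.Dict String String) × List (PySem.Dict String String) × List (PySem.Dict String String) :=
  let k := pos_key p
  if k = 0 then (acc.1 ++ [p], acc.2.1, acc.2.2.1, acc.2.2.2.1, acc.2.2.2.2)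
  else if k = 1 then (acc.1, acc.2.1 ++ [p], acc.2.2.1, acc.2.2.2.1, acc.2.2.2.2)
  else if k = 2 then (acc.1, acc.2.1, acc.2.2.1 ++ [p], acc.2.2.2.1, acc.2.2.2.2)
  else if k = 3 then (acc.1, acc.2.1, acc.2.2.1, acc.2.2.2.1 ++ [p], acc.2.2.2.2)
  else (acc.1, acc.2.1, acc.2.2.1, acc.2.2.2.1, acc.2.2.2.2 ++ [p])

def canonical_slot_alt (players : List (List (String × String))) : List (List (String × String)) :=
  let bs := (players.map PySem.Dict.ofList).foldl bucketPut ([], [], [], [], [])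
  let result := (bs.1 ++ bs.2.1 ++ bs.2.2.1 ++ bs.2.2.2.1 ++ bs.2.2.2.2).take 5
  (result.zipIdx.map (fun pi =>
    (((pi.1.insert "pos_abb" (SLOT_LABELS.getD pi.2 "")).erase "_raw_pos").items)))

-- ===== PRECONDITION & SPEC =====
-- Pre_ excludes players lacking a '_raw_pos' key: when such a player lands in the first
-- five slots, A's `del p['_raw_pos']` raises KeyError (with six or more players one can
-- slip past the slice and A still returns — see the cite in the claim).
def Pre_canonical_slot (players : List (List (String × String))) : Prop :=
  ∀ p ∈ players, ∃ kv ∈ p, kv.1 = "_raw_pos"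
instance (players : List (List (String × String))) : Decidable (Pre_canonical_slot players) := by
  unfold Pre_canonical_slot; infer_instance

def pvWitness_canonical_slot : (List (List (String × String))) :=
  [[("_raw_pos", "C")], [("_raw_pos", "G"), ("name", "a")]]

def Spec_canonical_slot (players : List (List (String × String))) (out : List (List (String × String))) : Prop := out = canonical_slot_alt players
instance (players : List (List (String × String))) (out : List (List (String × String))) : Decidable (Spec_canonical_slot players out) := by unfold Spec_canonical_slot; infer_instance

-- ===== CLAIM (what is proved, stated in full; the proofs are below) =====
def Claim_equal_canonical_slot : Prop := ∀ (players : List (List (String × String))), Dom_canonical_slot players → Pre_canonical_slot players → Spec_canonical_slot players (canonical_slot players)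

-- ===== LEMMAS AND PROOFS =====

-- the bucket with index i, as a filter of the input
def bucket (i : Int) (ps : List (PySem.Dict String String)) : List (PySem.Dict String String) :=
  ps.filter (fun p => pos_key p = i)

lemma bucket_snoc (i : Int) (ps : List (PySem.Dict String String)) (x : PySem.Dict String String) :
    bucket i (ps ++ [x]) = bucket i ps ++ (if pos_key x = i then [x] else []) := by
  simp [bucket, List.filter_append, List.filter_singleton]

lemma bucket_cons (i : Int) (x : PySem.Dict String String) (ds : List (PySem.Dict String String)) :
    bucket i (x :: ds) = (if pos_key x = i then [x] else []) ++ bucket i ds := by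
  by_cases h : pos_key x = i <;> simp [bucket, h]

lemma pos_key_range (p : PySem.Dict String String) :
    pos_key p = 0 ∨ pos_key p = 1 ∨ pos_key p = 2 ∨ pos_key p = 3 ∨ pos_key p = 4 := by
  have h : POS_ORDER = PySem.Dict.mk [("G", 0), ("G-F", 1), ("F-G", 1), ("F", 2), ("F-C", 3), ("C-F", 3), ("C", 4)] := by decide
  unfold pos_key
  rw [h]
  simp only [PySem.Dict.getD, PySem.Dict.get?_mk_cons]
  split_ifs <;> simp [PySem.Dict.get?]

lemma mem_bucket_key {i : Int} {y : PySem.Dict String String}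
    {ps : List (PySem.Dict String String)} (h : y ∈ bucket i ps) : pos_key y = i := by
  have := List.of_mem_filter h
  simpa using this

lemma insertBy_split (x : PySem.Dict String String) (L1 L2 : List (PySem.Dict String String))
    (h1 : ∀ y ∈ L1, pos_key y ≤ pos_key x) (h2 : ∀ y ∈ L2, pos_key x < pos_key y) :
    PySem.List.insertBy (fun a b => decide (pos_key a < pos_key b)) x (L1 ++ L2) = L1 ++ x :: L2 := by
  induction L1 with
  | nil =>
    cases L2 with
    | nil => rfl
    | cons y ys =>
      simp only [List.nil_append, PySem.List.insertBy]
      rw [if_pos (by simpa using h2 y (by simp))]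
  | cons a L1 ih =>
    simp only [List.cons_append, PySem.List.insertBy]
    rw [if_neg (by simpa using not_lt.mpr (h1 a (by simp)))]
    rw [ih (fun y hy => h1 y (by simp [hy]))]

lemma insert_step (ps : List (PySem.Dict String String)) (x : PySem.Dict String String) :
    PySem.List.insertBy (fun a b => decide (pos_key a < pos_key b)) x
      (bucket 0 ps ++ bucket 1 ps ++ bucket 2 ps ++ bucket 3 ps ++ bucket 4 ps)
    = bucket 0 (ps ++ [x]) ++ bucket 1 (ps ++ [x]) ++ bucket 2 (ps ++ [x]) ++
      bucket 3 (ps ++ [x]) ++ bucket 4 (ps ++ [x]) := by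
  rcases pos_key_range x with hk | hk | hk | hk | hk
  · have e := insertBy_split x (bucket 0 ps)
      (bucket 1 ps ++ bucket 2 ps ++ bucket 3 ps ++ bucket 4 ps)
      (by intro y hy; have := mem_bucket_key hy; omega)
      (by intro y hy; simp only [List.mem_append] at hy
          rcases hy with (((h|h)|h)|h) <;> have := mem_bucket_key h <;> omega)
    simp only [List.append_assoc] at e ⊢
    rw [e]
    simp [bucket_snoc, hk, List.append_assoc]
  · have e := insertBy_split x (bucket 0 ps ++ bucket 1 ps)
      (bucket 2 ps ++ bucket 3 ps ++ bucket 4 ps)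
      (by intro y hy; simp only [List.mem_append] at hy
          rcases hy with (h|h) <;> have := mem_bucket_key h <;> omega)
      (by intro y hy; simp only [List.mem_append] at hy
          rcases hy with ((h|h)|h) <;> have := mem_bucket_key h <;> omega)
    simp only [List.append_assoc] at e ⊢
    rw [e]
    simp [bucket_snoc, hk, List.append_assoc]
  · have e := insertBy_split x (bucket 0 ps ++ bucket 1 ps ++ bucket 2 ps)
      (bucket 3 ps ++ bucket 4 ps)
      (by intro y hy; simp only [List.mem_append] at hy
          rcases hy with ((h|h)|h) <;> have := mem_bucket_key h <;> omega)
      (by intro y hy; simp only [List.mem_append] at hy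
          rcases hy with (h|h) <;> have := mem_bucket_key h <;> omega)
    simp only [List.append_assoc] at e ⊢
    rw [e]
    simp [bucket_snoc, hk, List.append_assoc]
  · have e := insertBy_split x (bucket 0 ps ++ bucket 1 ps ++ bucket 2 ps ++ bucket 3 ps)
      (bucket 4 ps)
      (by intro y hy; simp only [List.mem_append] at hy
          rcases hy with (((h|h)|h)|h) <;> have := mem_bucket_key h <;> omega)
      (by intro y hy; have := mem_bucket_key hy; omega)
    simp only [List.append_assoc] at e ⊢
    rw [e]
    simp [bucket_snoc, hk, List.append_assoc]
  · have e := insertBy_split x (bucket 0 ps ++ bucket 1 ps ++ bucket 2 ps ++ bucket 3 ps ++ bucket 4 ps)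
      ([])
      (by intro y hy; simp only [List.mem_append] at hy
          rcases hy with ((((h|h)|h)|h)|h) <;> have := mem_bucket_key h <;> omega)
      (by simp)
    simp only [List.append_assoc, List.append_nil] at e ⊢
    rw [e]
    simp [bucket_snoc, hk]

lemma sorted_eq_buckets (ds : List (PySem.Dict String String)) :
    PySem.List.sorted ds pos_key
    = bucket 0 ds ++ bucket 1 ds ++ bucket 2 ds ++ bucket 3 ds ++ bucket 4 ds := by
  rw [PySem.List.sorted_eq_foldl_insertBy]
  have key : ∀ (l ps : List (PySem.Dict String String)),
      l.foldl (fun acc x => PySem.List.insertBy (fun a b => decide (pos_key a < pos_key b)) x acc)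
        (bucket 0 ps ++ bucket 1 ps ++ bucket 2 ps ++ bucket 3 ps ++ bucket 4 ps)
      = bucket 0 (ps ++ l) ++ bucket 1 (ps ++ l) ++ bucket 2 (ps ++ l) ++ bucket 3 (ps ++ l) ++ bucket 4 (ps ++ l) := by
    intro l
    induction l with
    | nil => intro ps; simp
    | cons x t ih =>
      intro ps
      simp only [List.foldl_cons, insert_step ps x]
      rw [ih (ps ++ [x])]
      simp
  have h0 := key ds []
  simpa [bucket] using h0

lemma foldl_bucketPut (ds : List (PySem.Dict String String)) :
    ∀ (b0 b1 b2 b3 b4 : List (PySem.Dict String String)),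
    ds.foldl bucketPut (b0, b1, b2, b3, b4)
    = (b0 ++ bucket 0 ds, b1 ++ bucket 1 ds, b2 ++ bucket 2 ds, b3 ++ bucket 3 ds, b4 ++ bucket 4 ds) := by
  induction ds with
  | nil => intro b0 b1 b2 b3 b4; simp [bucket]
  | cons x t ih =>
    intro b0 b1 b2 b3 b4
    simp only [List.foldl_cons]
    rcases pos_key_range x with hk | hk | hk | hk | hk <;>
      · simp only [bucketPut, hk]
        norm_num
        rw [ih]
        simp [bucket_cons, hk]

-- ===== VERDICT (by name: the statement is the Claim_ definition above) =====
theorem canonical_slot_spec : Claim_equal_canonical_slot := by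
  intro players _ _
  unfold Spec_canonical_slot canonical_slot canonical_slot_alt
  rw [sorted_eq_buckets, foldl_bucketPut]
  simp
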